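-- pv_equiv track=rewrite | github.com/Angest1/ivaostatusbot-autodb.py | src/utils/text_utils.py | join_with_limit
-- ===== SOURCE A (Python) =====
-- from typing import List
--
-- def join_with_limit(items: List[str], sep: str = "/", limit: int = 1024, suffix: str = "...") -> str:
--     """Join items with separator, respecting character limit."""
--     result = []
--     length = 0
--
--     for item in items:
--         extra = (len(sep) if result else 0) + len(item)
--         if length + extra + len(suffix) > limit:
--             return sep.join(result) + suffix
--         result.append(item)
--         length += extra
--
--     return sep.join(result)
-- ===== SOURCE B (Python) =====
-- from typing import List
--
-- def join_with_limit(items: List[str], sep: str = "/", limit: int = 1024, suffix: str = "...") -> str: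
--     """Join items with separator, respecting character limit."""
--     # Pass 1: cumulative joined lengths of each prefix.
--     lens = []
--     total = 0
--     for item in items:
--         total += (len(sep) if lens else 0) + len(item)
--         lens.append(total)
--     # Pass 2: cut index = how many leading prefixes fit together with the suffix.
--     k = 0
--     while k < len(lens) and lens[k] + len(suffix) <= limit:
--         k += 1
--     # Pass 3: join once at the cut.
--     if k == len(items):
--         return sep.join(items)
--     return sep.join(items[:k]) + suffix
-- ===== Notes on version B (the rewrite author's own statement) =====
-- stated objective: alternative
-- what changed: Replaces A's single loop that grows a result list with an early return by three staged passes: build the list of cumulative joined-prefix lengths, scan it to find the cut index, then slice and join once.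
import Mathlib
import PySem

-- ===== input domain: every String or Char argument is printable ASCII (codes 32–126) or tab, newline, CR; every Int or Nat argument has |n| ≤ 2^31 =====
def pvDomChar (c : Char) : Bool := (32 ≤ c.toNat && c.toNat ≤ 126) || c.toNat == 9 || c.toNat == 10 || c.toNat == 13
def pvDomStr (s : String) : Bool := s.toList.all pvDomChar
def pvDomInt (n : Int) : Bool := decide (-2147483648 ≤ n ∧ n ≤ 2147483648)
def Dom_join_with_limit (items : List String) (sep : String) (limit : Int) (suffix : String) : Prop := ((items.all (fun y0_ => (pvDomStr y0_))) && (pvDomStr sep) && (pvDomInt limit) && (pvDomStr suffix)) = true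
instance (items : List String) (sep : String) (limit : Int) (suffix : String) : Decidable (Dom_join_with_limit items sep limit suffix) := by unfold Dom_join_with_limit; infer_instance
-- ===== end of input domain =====

-- B replaces A's single accumulate-and-bail loop by three staged passes: prefix-length list, cut-index scan, one final slice+join (alternative decomposition).

-- ===== PORT A =====
-- A's loop: state = (result, length); on overflow return joined result + suffix.
def joinA_go (sep : String) (limit : Int) (suffix : String) :
    List String → List String → Int → String
  | [], result, _ => PySem.Str.join sep result
  | item :: rest, result, length =>
      let extra := (if result.isEmpty then 0 else PySem.Str.len sep) + PySem.Str.len item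
      if length + extra + PySem.Str.len suffix > limit then
        PySem.Str.join sep result ++ suffix
      else
        joinA_go sep limit suffix rest (result ++ [item]) (length + extra)

def join_with_limit (items : List String) (sep : String) (limit : Int) (suffix : String) : String :=
  joinA_go sep limit suffix items [] 0

-- ===== PORT B =====
-- Pass 1: cumulative joined lengths of the prefixes ('first' mirrors Python's 'if lens else 0').
def joinB_lens (sep : String) : List String → Int → Bool → List Int
  | [], _, _ => []
  | item :: rest, total, first =>
      let t := total + (if first then 0 else PySem.Str.len sep) + PySem.Str.len item
      t :: joinB_lens sep rest t false

-- Pass 2: cut index = number of leading prefix lengths fitting together with suffix.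
def joinB_cut (limit : Int) (suffix : String) : List Int → Nat
  | [] => 0
  | l :: rest => if l + PySem.Str.len suffix ≤ limit then 1 + joinB_cut limit suffix rest else 0

def join_with_limit_alt (items : List String) (sep : String) (limit : Int) (suffix : String) : String :=
  let lens := joinB_lens sep items 0 true
  let k := joinB_cut limit suffix lens
  if k = items.length then PySem.Str.join sep items
  else PySem.Str.join sep (items.take k) ++ suffix

-- ===== PRECONDITION & SPEC =====
def Spec_join_with_limit (items : List String) (sep : String) (limit : Int) (suffix : String) (out : String) : Prop := out = join_with_limit_alt items sep limit suffix
instance (items : List String) (sep : String) (limit : Int) (suffix : String) (out : String) : Decidable (Spec_join_with_limit items sep limit suffix out) := by unfold Spec_join_with_limit; infer_instance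

-- ===== CLAIM (what is proved, stated in full; the proofs are below) =====
def Claim_equal_join_with_limit : Prop := ∀ (items : List String) (sep : String) (limit : Int) (suffix : String), Dom_join_with_limit items sep limit suffix → Spec_join_with_limit items sep limit suffix (join_with_limit items sep limit suffix)

-- ===== LEMMAS AND PROOFS =====

-- A's loop, from any state, equals B's staged computation on the remaining items.
theorem go_eq (sep : String) (limit : Int) (suffix : String) :
    ∀ (rest result : List String) (length : Int),
      joinA_go sep limit suffix rest result length =
        (let lens := joinB_lens sep rest length result.isEmpty
         let k := joinB_cut limit suffix lens
         if k = rest.length then PySem.Str.join sep (result ++ rest)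
         else PySem.Str.join sep (result ++ rest.take k) ++ suffix) := by
  intro rest
  induction rest with
  | nil => intro result length; simp [joinA_go, joinB_lens, joinB_cut]
  | cons item tail ih =>
      intro result length
      simp only [joinA_go, joinB_lens, joinB_cut]
      by_cases hc : length + ((if result.isEmpty = true then 0 else PySem.Str.len sep) + PySem.Str.len item) + PySem.Str.len suffix > limit
      · have hc' : ¬ (length + (if result.isEmpty = true then 0 else PySem.Str.len sep) + PySem.Str.len item + PySem.Str.len suffix ≤ limit) := by omega
        simp only [if_pos (by omega : length + ((if result.isEmpty = true then 0 else PySem.Str.len sep) + PySem.Str.len item) + PySem.Str.len suffix > limit), if_neg hc']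
        simp
      · have hc' : length + (if result.isEmpty = true then 0 else PySem.Str.len sep) + PySem.Str.len item + PySem.Str.len suffix ≤ limit := by omega
        rw [if_neg (by omega : ¬ length + ((if result.isEmpty = true then 0 else PySem.Str.len sep) + PySem.Str.len item) + PySem.Str.len suffix > limit)]
        rw [ih (result ++ [item]) (length + ((if result.isEmpty = true then 0 else PySem.Str.len sep) + PySem.Str.len item))]
        have hemp : (result ++ [item]).isEmpty = false := by simp
        have ht : length + ((if result.isEmpty = true then 0 else PySem.Str.len sep) + PySem.Str.len item)
            = length + (if result.isEmpty = true then 0 else PySem.Str.len sep) + PySem.Str.len item := by ring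
        rw [hemp, ht, if_pos hc']
        simp [Nat.add_comm 1, List.take_succ_cons]

-- ===== VERDICT (by name: the statement is the Claim_ definition above) =====
theorem join_with_limit_spec : Claim_equal_join_with_limit := by
  intro items sep limit suffix _
  unfold Spec_join_with_limit join_with_limit join_with_limit_alt
  rw [go_eq]
  simp
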